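-- pv_equiv track=rewrite | github.com/aminammar1/chess-puzzle-next-go | services/voice-to-move/app/parser/move_parser.py | _merge_split_squares
-- ===== SOURCE A (Python) =====
-- def _merge_split_squares(text: str) -> str:
--     """
--     Merge a lone file letter followed by a digit into a square.
--     e.g. "e 2 to e 4" → "e2 to e4", "echo 4" → (after file-word replace) "e 4" → "e4"
--     """
--     words = text.split()
--     merged: list[str] = []
--     i = 0
--     while i < len(words):
--         # If current word is a single file letter and next is a rank digit
--         if (
--             i + 1 < len(words)
--             and len(words[i]) == 1
--             and words[i] in "abcdefgh"
--             and len(words[i + 1]) == 1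
--             and words[i + 1] in "12345678"
--         ):
--             merged.append(words[i] + words[i + 1])
--             i += 2
--         else:
--             merged.append(words[i])
--             i += 1
--     return " ".join(merged)
-- ===== SOURCE B (Python) =====
-- def _merge_split_squares(text: str) -> str:
--     """One forward pass: merge a rank digit into the previously emitted
--     lone file letter instead of index-based lookahead."""
--     FILES = set("abcdefgh")
--     RANKS = set("12345678")
--     out: list[str] = []
--     for w in text.split():
--         if w in RANKS and out and out[-1] in FILES:
--             out[-1] += w
--         else:
--             out.append(w)
--     return " ".join(out)
-- ===== Notes on version B (the rewrite author's own statement) =====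
-- stated objective: simpler
-- what changed: Replaces A's index-based while-loop with lookahead (words[i], words[i+1], i += 2) by a single forward fold that appends each word and merges a rank digit into the previously emitted lone file letter; the length-1 substring tests become set membership.
import Mathlib
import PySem

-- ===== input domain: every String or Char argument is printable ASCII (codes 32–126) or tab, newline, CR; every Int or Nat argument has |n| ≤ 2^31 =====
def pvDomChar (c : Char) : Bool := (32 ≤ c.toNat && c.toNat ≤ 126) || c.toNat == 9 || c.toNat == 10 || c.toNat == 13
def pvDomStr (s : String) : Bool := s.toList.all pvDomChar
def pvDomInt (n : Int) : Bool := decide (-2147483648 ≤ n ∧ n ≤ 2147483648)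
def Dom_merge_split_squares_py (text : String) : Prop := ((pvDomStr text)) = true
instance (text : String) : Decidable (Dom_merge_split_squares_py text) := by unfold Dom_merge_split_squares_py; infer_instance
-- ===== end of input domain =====

-- B replaces A's index-based lookahead loop by a single forward pass that merges a rank
-- digit into the previously emitted lone file letter (objective: simpler; same cost).

-- ===== PORT A =====
-- guard of A's while-loop body: i + 1 < len(words) and len(words[i]) == 1 and
-- words[i] in "abcdefgh" and len(words[i+1]) == 1 and words[i+1] in "12345678"
-- (indices are guarded in range, so words[i] is getD i "")
def pvGuardA (words : List String) (i : Nat) : Bool :=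
  decide (i + 1 < words.length) &&
  (PySem.Str.len (words.getD i "") == 1) &&
  PySem.Str.isIn (words.getD i "") "abcdefgh" &&
  (PySem.Str.len (words.getD (i + 1) "") == 1) &&
  PySem.Str.isIn (words.getD (i + 1) "") "12345678"

-- the while-loop: state (i, merged)
def pvLoopA (words : List String) (i : Nat) (merged : List String) : List String :=
  if _h : i < words.length then
    if pvGuardA words i then
      pvLoopA words (i + 2) (merged ++ [words.getD i "" ++ words.getD (i + 1) ""])
    else
      pvLoopA words (i + 1) (merged ++ [words.getD i ""])
  else merged
termination_by words.length - i

def merge_split_squares_py (text : String) : String :=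
  PySem.Str.join " " (pvLoopA (PySem.Str.split₀ text) 0 [])

-- ===== PORT B =====
-- FILES = set("abcdefgh"), RANKS = set("12345678") (membership only; order unused)
def pvFiles : List String := ["a", "b", "c", "d", "e", "f", "g", "h"]
def pvRanks : List String := ["1", "2", "3", "4", "5", "6", "7", "8"]

-- loop body: if w in RANKS and out and out[-1] in FILES: out[-1] += w else: out.append(w)
-- (out[-1] read guarded by 'out', hence getLast?.getD "")
def pvStepB (out : List String) (w : String) : List String :=
  if pvRanks.contains w && !out.isEmpty && pvFiles.contains (out.getLast?.getD "") then
    out.dropLast ++ [out.getLast?.getD "" ++ w]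
  else out ++ [w]

def merge_split_squares_py_alt (text : String) : String :=
  PySem.Str.join " " ((PySem.Str.split₀ text).foldl pvStepB [])

-- ===== PRECONDITION & SPEC =====
def Spec_merge_split_squares_py (text : String) (out : String) : Prop := out = merge_split_squares_py_alt text
instance (text : String) (out : String) : Decidable (Spec_merge_split_squares_py text out) := by unfold Spec_merge_split_squares_py; infer_instance

-- ===== CLAIM (what is proved, stated in full; the proofs are below) =====
def Claim_equal_merge_split_squares_py : Prop := ∀ (text : String), Dom_merge_split_squares_py text → Spec_merge_split_squares_py text (merge_split_squares_py text)

-- ===== LEMMAS AND PROOFS =====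

-- common reference function: the word list after merging, pairwise from the left
def pvCond (w r : String) : Bool := pvFiles.contains w && pvRanks.contains r

def pvMerge : List String → List String
  | [] => []
  | [w] => [w]
  | w :: r :: rest => if pvCond w r then (w ++ r) :: pvMerge rest else w :: pvMerge (r :: rest)

-- a length-1 word lying in a string ↔ membership in the list of its one-char substrings
lemma pv_singleton_isIn (w s : String) :
    ((PySem.Str.len w == 1) && PySem.Str.isIn w s)
      = (s.toList.map (fun c => String.ofList [c])).contains w := by
  have hlen : PySem.Str.len w = w.toList.length := by simp [pysem]
  rcases hl : w.toList with _ | ⟨c, _ | ⟨c2, tl⟩⟩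
  · have hne : (PySem.Str.len w == 1) = false := by
      rw [hlen, hl, beq_eq_false_iff_ne]
      simp
    have hm : w ∉ s.toList.map (fun c => String.ofList [c]) := by
      intro hmem
      rcases List.mem_map.mp hmem with ⟨c, _, hc⟩
      have := congrArg String.toList hc
      simp [hl] at this
    rw [hne, Bool.false_and, List.contains_eq_mem, eq_comm, decide_eq_false_iff_not]
    exact hm
  · have h1 : (PySem.Str.len w == 1) = true := by rw [hlen, hl]; rfl
    have hiff : PySem.Str.isIn w s = true ↔ c ∈ s.toList := by
      rw [PySem.Str.isIn_iff_infix, hl, List.singleton_infix_iff]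
    have hiff2 : w ∈ s.toList.map (fun c => String.ofList [c]) ↔ c ∈ s.toList := by
      constructor
      · intro hmem
        rcases List.mem_map.mp hmem with ⟨c', hc', he⟩
        have h2 := congrArg String.toList he
        simp [hl] at h2
        exact h2 ▸ hc'
      · intro hc
        refine List.mem_map.mpr ⟨c, hc, ?_⟩
        apply String.toList_inj.mp
        simp [hl]
    rw [Bool.eq_iff_iff]
    simp only [h1, Bool.true_and, List.contains_eq_mem, decide_eq_true_eq]
    rw [hiff, hiff2]
  · have hne : (PySem.Str.len w == 1) = false := by
      rw [hlen, hl, beq_eq_false_iff_ne]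
      simp only [List.length_cons]
      omega
    have hm : w ∉ s.toList.map (fun c => String.ofList [c]) := by
      intro hmem
      rcases List.mem_map.mp hmem with ⟨c', _, hc⟩
      have := congrArg String.toList hc
      simp [hl] at this
    rw [hne, Bool.false_and, List.contains_eq_mem, eq_comm, decide_eq_false_iff_not]
    exact hm

lemma pv_file_eq (w : String) :
    ((PySem.Str.len w == 1) && PySem.Str.isIn w "abcdefgh") = pvFiles.contains w := by
  rw [pv_singleton_isIn]
  have : ("abcdefgh".toList.map (fun c => String.ofList [c])) = pvFiles := by decide
  rw [this]

lemma pv_rank_eq (w : String) :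
    ((PySem.Str.len w == 1) && PySem.Str.isIn w "12345678") = pvRanks.contains w := by
  rw [pv_singleton_isIn]
  have : ("12345678".toList.map (fun c => String.ofList [c])) = pvRanks := by decide
  rw [this]

lemma pv_guard_eq (words : List String) (i : Nat) :
    pvGuardA words i
      = (decide (i + 1 < words.length) && pvCond (words.getD i "") (words.getD (i + 1) "")) := by
  unfold pvGuardA pvCond
  rw [← pv_file_eq, ← pv_rank_eq]
  cases decide (i + 1 < words.length) <;>
    cases PySem.Str.len (words.getD i "") == 1 <;>
    cases PySem.Str.isIn (words.getD i "") "abcdefgh" <;>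
    cases PySem.Str.len (words.getD (i + 1) "") == 1 <;>
    cases PySem.Str.isIn (words.getD (i + 1) "") "12345678" <;> rfl

-- a merged square (file letter ++ rank digit) is never a file letter again
lemma pv_concat_not_file (w r : String) (hw : w ∈ pvFiles)
    (hr : r ∈ pvRanks) : pvFiles.contains (w ++ r) = false := by
  fin_cases hw <;> fin_cases hr <;> decide

-- A's loop equals pvMerge of the remaining suffix
lemma pv_loopA_eq (words : List String) (i : Nat) (merged : List String) :
    pvLoopA words i merged = merged ++ pvMerge (words.drop i) := by
  induction i, merged using pvLoopA.induct words with
  | case1 i merged h hg ih =>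
    have h1 : i + 1 < words.length := by
      by_contra hc
      rw [pv_guard_eq] at hg
      simp [hc] at hg
    have hcnd : pvCond (words.getD i "") (words.getD (i + 1) "") = true := by
      rw [pv_guard_eq] at hg
      cases hx : pvCond (words.getD i "") (words.getD (i + 1) "") <;> simp_all
    have hd : words.drop i = words.getD i "" :: words.getD (i + 1) "" :: words.drop (i + 2) := by
      rw [List.getD_eq_getElem words "" h, List.getD_eq_getElem words "" h1,
          List.drop_eq_getElem_cons h, List.drop_eq_getElem_cons h1]
    rw [pvLoopA, dif_pos h, if_pos hg, ih, hd]
    simp only [pvMerge]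
    rw [if_pos hcnd]
    simp
  | case2 i merged h hg ih =>
    have hd : words.drop i = words.getD i "" :: words.drop (i + 1) := by
      rw [List.getD_eq_getElem words "" h, List.drop_eq_getElem_cons h]
    rw [pvLoopA, dif_pos h, if_neg hg, ih, hd]
    rcases he : words.drop (i + 1) with _ | ⟨r, rest⟩
    · simp [pvMerge]
    · have h1 : i + 1 < words.length := by
        by_contra hc
        rw [List.drop_eq_nil_iff.mpr (by omega)] at he
        exact (List.cons_ne_nil _ _) he.symm
      have hstep := (List.drop_eq_getElem_cons h1 (l := words)).symm.trans he
      have hr : r = words.getD (i + 1) "" := by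
        rw [List.getD_eq_getElem words "" h1]
        exact (((List.cons.injEq _ _ _ _).mp hstep).1).symm
      have hcf : pvCond (words.getD i "") r = false := by
        rw [pv_guard_eq] at hg
        rw [hr]
        cases hx : pvCond (words.getD i "") (words.getD (i + 1) "") <;> simp_all
      simp only [pvMerge]
      rw [if_neg (by simp only [Bool.not_eq_true]; exact hcf)]
      simp
  | case3 i merged h =>
    rw [pvLoopA, dif_neg h, List.drop_eq_nil_iff.mpr (by omega)]
    simp [pvMerge]

-- B's fold equals pvMerge, as long as the accumulator's last word cannot merge
-- with the first incoming word
lemma pv_foldB_eq (ws : List String) (out : List String)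
    (H : ∀ l w', out.getLast? = some l → ws.head? = some w' →
          (pvRanks.contains w' && pvFiles.contains l) = false) :
    ws.foldl pvStepB out = out ++ pvMerge ws := by
  induction ws using pvMerge.induct generalizing out with
  | case1 => simp [pvMerge]
  | case2 w =>
    simp only [List.foldl_cons, List.foldl_nil, pvMerge]
    unfold pvStepB
    rcases hl : out.getLast? with _ | l
    · have : out = [] := by simpa using hl
      simp [this]
    · rw [if_neg]
      simp only [Bool.not_eq_true]
      have := H l w hl rfl
      cases hR : pvRanks.contains w <;> simp_all
  | case3 w r rest hc ih =>
    have hc' : w ∈ pvFiles ∧ r ∈ pvRanks := by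
      simpa [pvCond, List.contains_eq_mem] using hc
    have step1 : pvStepB out w = out ++ [w] := by
      unfold pvStepB
      rcases hl : out.getLast? with _ | l
      · have : out = [] := by simpa using hl
        simp [this]
      · rw [if_neg]
        simp only [Bool.not_eq_true]
        have := H l w hl rfl
        cases hR : pvRanks.contains w <;> simp_all
    have step2 : pvStepB (out ++ [w]) r = out ++ [w ++ r] := by
      unfold pvStepB
      rw [if_pos]
      · simp
      · simp [List.contains_eq_mem, hc'.1, hc'.2]
    simp only [List.foldl_cons, step1, step2]
    rw [ih (out ++ [w ++ r])]
    · simp [pvMerge, hc]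
    · intro l w' hl hw'
      simp only [List.getLast?_append, List.getLast?_singleton] at hl
      have hl' : w ++ r = l := by simpa using hl
      rw [← hl', pv_concat_not_file w r hc'.1 hc'.2]
      simp
  | case4 w r rest hc ih =>
    have step1 : pvStepB out w = out ++ [w] := by
      unfold pvStepB
      rcases hl : out.getLast? with _ | l
      · have : out = [] := by simpa using hl
        simp [this]
      · rw [if_neg]
        simp only [Bool.not_eq_true]
        have := H l w hl rfl
        cases hR : pvRanks.contains w <;> simp_all
    simp only [List.foldl_cons] at ih ⊢
    rw [step1, ih (out ++ [w])]
    · simp [pvMerge, hc]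
    · intro l w' hl hw'
      have hl' : w = l := by simpa using hl
      have hw'' : r = w' := by simpa using hw'
      subst hl' hw''
      cases hF : pvFiles.contains w <;> cases hR : pvRanks.contains r <;>
        simp_all [pvCond]

-- ===== VERDICT (by name: the statement is the Claim_ definition above) =====
theorem merge_split_squares_py_spec : Claim_equal_merge_split_squares_py := by
  intro text _
  unfold Spec_merge_split_squares_py merge_split_squares_py merge_split_squares_py_alt
  rw [pv_loopA_eq, pv_foldB_eq]
  · simp
  · intro l w' hl _
    simp at hl
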